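-- pv_equiv track=rewrite | github.com/nogicoder/farcry-datascience-intro | farcry.py | calculate_serial_losers
-- ===== SOURCE A (Python) =====
-- def find_losing_streak(player_name, frags):
--     """
--     Find the longest streak a player is being a victim during the session.
--     Returning a list of frags of the current player.
--     @param player_name: The current player being assessed
--     @param frags: List of frags
--     """
--     longest_streak = []
--     current_streak = []
--     for frag in frags:
--         if len(frag) > 2 and frag[2] == player_name:
--             current_streak.append((frag[0], frag[1], frag[3]))
--         elif len(frag) == 2 and frag[1] == player_name:
--             current_streak.append((frag[0], None, None))
--         elif len(frag) > 2 and frag[1] == player_name: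
--             if len(current_streak) > len(longest_streak):
--                 longest_streak = current_streak
--
--             current_streak = []
--
--     return longest_streak
--
-- def calculate_serial_losers(frags):
--     """
--     Main function used to find the longest losing
--     streaks of all players in a session.
--     Returning a dictionary of the losing streaks of players.
--
--     @param frags: List of frags
--     """
--     losers = {}
--     for frag in frags:
--         if len(frag) > 2 and frag[2] not in losers.keys():
--             player_name = frag[2]
--             losers[player_name] = find_losing_streak(player_name, frags)
--         elif len(frag) == 2 and frag[1] not in losers.keys():
--             player_name = frag[1]
--             losers[player_name] = find_losing_streak(player_name, frags)
--
--     return losers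
-- ===== SOURCE B (Python) =====
-- def calculate_serial_losers(frags):
--     """Single-pass version: one dict mapping player -> (longest, current) streaks."""
--     state = {}  # player -> (longest_streak, current_streak), registered at first victimhood
--     for frag in frags:
--         if len(frag) > 2:
--             victim, killer = frag[2], frag[1]
--             longest, current = state.get(victim, ([], []))
--             state[victim] = (longest, current + [(frag[0], frag[1], frag[3])])
--             if killer != victim and killer in state:
--                 longest, current = state[killer]
--                 state[killer] = (current if len(current) > len(longest) else longest, [])
--         elif len(frag) == 2:
--             victim = frag[1]
--             longest, current = state.get(victim, ([], []))
--             state[victim] = (longest, current + [(frag[0], None, None)])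
--     return {p: longest for p, (longest, current) in state.items()}
-- ===== Notes on version B (the rewrite author's own statement) =====
-- stated objective: faster
-- what changed: Replaces the per-player full rescan of the frag list (one find_losing_streak pass per distinct victim) with a single pass that maintains each player's current and longest losing streak in one dict.
import Mathlib
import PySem

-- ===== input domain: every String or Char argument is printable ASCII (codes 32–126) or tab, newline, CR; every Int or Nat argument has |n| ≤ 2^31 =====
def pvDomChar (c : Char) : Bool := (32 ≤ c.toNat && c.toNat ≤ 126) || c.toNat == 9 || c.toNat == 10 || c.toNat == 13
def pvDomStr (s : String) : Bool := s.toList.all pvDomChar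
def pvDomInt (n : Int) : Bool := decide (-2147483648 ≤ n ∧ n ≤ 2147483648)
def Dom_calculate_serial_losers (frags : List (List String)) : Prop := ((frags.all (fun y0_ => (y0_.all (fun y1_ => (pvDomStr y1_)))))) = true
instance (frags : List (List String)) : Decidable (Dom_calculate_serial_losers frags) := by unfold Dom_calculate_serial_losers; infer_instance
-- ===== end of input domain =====

-- B replaces A's per-player rescan (find_losing_streak once per distinct victim, O(P*n))
-- by a single pass keeping each player's (longest, current) losing streak in one dict (O(n)).

-- ===== PORT A =====
-- one iteration of find_losing_streak's loop; state = (longest_streak, current_streak)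
def flsStep (player : String) (st : List (Option String × Option String × Option String) × List (Option String × Option String × Option String))
    (frag : List String) : List (Option String × Option String × Option String) × List (Option String × Option String × Option String) :=
  if frag.length > 2 ∧ frag.getD 2 "" = player then
    -- indices 0,1,3 in range under Pre_ (length > 2 and ≠ 3 ⇒ ≥ 4); Python raises at frag[3] when length = 3
    (st.1, st.2 ++ [(some (frag.getD 0 ""), some (frag.getD 1 ""), some (frag.getD 3 ""))])
  else if frag.length = 2 ∧ frag.getD 1 "" = player then
    (st.1, st.2 ++ [(some (frag.getD 0 ""), none, none)])
  else if frag.length > 2 ∧ frag.getD 1 "" = player then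
    (if st.2.length > st.1.length then st.2 else st.1, [])
  else st

def find_losing_streak (player_name : String) (frags : List (List String)) :
    List (Option String × Option String × Option String) :=
  (frags.foldl (flsStep player_name) ([], [])).1

-- one iteration of calculate_serial_losers' main loop
def cslStep (frags : List (List String)) (losers : PySem.Dict String (List (Option String × Option String × Option String)))
    (frag : List String) : PySem.Dict String (List (Option String × Option String × Option String)) :=
  if frag.length > 2 ∧ ¬ losers.contains (frag.getD 2 "") then
    losers.insert (frag.getD 2 "") (find_losing_streak (frag.getD 2 "") frags)
  else if frag.length = 2 ∧ ¬ losers.contains (frag.getD 1 "") then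
    losers.insert (frag.getD 1 "") (find_losing_streak (frag.getD 1 "") frags)
  else losers

def calculate_serial_losers (frags : List (List String)) : List (String × List (Option String × Option String × Option String)) :=
  (frags.foldl (cslStep frags) PySem.Dict.empty).items

-- ===== PORT B =====
-- one iteration of B's single pass; dict value = (longest_streak, current_streak)
def cslAltStep (st : PySem.Dict String (List (Option String × Option String × Option String) × List (Option String × Option String × Option String)))
    (frag : List String) : PySem.Dict String (List (Option String × Option String × Option String) × List (Option String × Option String × Option String)) :=
  if frag.length > 2 then
    let victim := frag.getD 2 ""
    let killer := frag.getD 1 ""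
    let lc := st.getD victim ([], [])
    let st1 := st.insert victim (lc.1, lc.2 ++ [(some (frag.getD 0 ""), some (frag.getD 1 ""), some (frag.getD 3 ""))])
    if killer ≠ victim ∧ st1.contains killer then
      let lc2 := st1.getD killer ([], [])
      st1.insert killer (if lc2.2.length > lc2.1.length then lc2.2 else lc2.1, [])
    else st1
  else if frag.length = 2 then
    let victim := frag.getD 1 ""
    let lc := st.getD victim ([], [])
    st.insert victim (lc.1, lc.2 ++ [(some (frag.getD 0 ""), none, none)])
  else st

def calculate_serial_losers_alt (frags : List (List String)) : List (String × List (Option String × Option String × Option String)) :=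
  -- the final dict comprehension {p: longest for p, (longest, current) in state.items()}: keys are
  -- already distinct, so it is exactly this map over the items
  ((frags.foldl cslAltStep PySem.Dict.empty).items).map (fun p => (p.1, p.2.1))

-- ===== PRECONDITION & SPEC =====
-- Pre_ excludes frag lists containing a frag of length exactly 3: there Python A reaches frag[3]
-- inside find_losing_streak and raises IndexError (B raises the same way).
def Pre_calculate_serial_losers (frags : List (List String)) : Prop :=
  ∀ frag ∈ frags, frag.length ≠ 3
instance (frags : List (List String)) : Decidable (Pre_calculate_serial_losers frags) := by
  unfold Pre_calculate_serial_losers; infer_instance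
def pvWitness_calculate_serial_losers : List (List String) :=
  [["10", "alice", "bob", "Machete"], ["12", "bob"], ["15", "bob", "alice", "AK47"]]

def Spec_calculate_serial_losers (frags : List (List String)) (out : List (String × List (Option String × Option String × Option String))) : Prop := out = calculate_serial_losers_alt frags
instance (frags : List (List String)) (out : List (String × List (Option String × Option String × Option String))) : Decidable (Spec_calculate_serial_losers frags out) := by unfold Spec_calculate_serial_losers; infer_instance

-- ===== CLAIM (what is proved, stated in full; the proofs are below) =====
def Claim_equal_calculate_serial_losers : Prop := ∀ (frags : List (List String)), Dom_calculate_serial_losers frags → Pre_calculate_serial_losers frags → Spec_calculate_serial_losers frags (calculate_serial_losers frags)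

-- ===== LEMMAS AND PROOFS =====

-- how one loop iteration of find_losing_streak acts, by case
theorem flsStep_victim3 (p : String) (frag : List String) (st : _ × _)
    (h : frag.length > 2) (hv : frag.getD 2 "" = p) :
    flsStep p st frag = (st.1, st.2 ++ [(some (frag.getD 0 ""), some (frag.getD 1 ""), some (frag.getD 3 ""))]) := by
  unfold flsStep; rw [if_pos ⟨h, hv⟩]

theorem flsStep_victim2 (p : String) (frag : List String) (st : _ × _)
    (h : frag.length = 2) (hv : frag.getD 1 "" = p) :
    flsStep p st frag = (st.1, st.2 ++ [(some (frag.getD 0 ""), none, none)]) := by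
  unfold flsStep
  rw [if_neg (fun hc : frag.length > 2 ∧ frag.getD 2 "" = p => absurd hc.1 (by omega)),
      if_pos ⟨h, hv⟩]

theorem flsStep_killer (p : String) (frag : List String) (st : _ × _)
    (h : frag.length > 2) (hv : frag.getD 2 "" ≠ p) (hk : frag.getD 1 "" = p) :
    flsStep p st frag = (if st.2.length > st.1.length then st.2 else st.1, []) := by
  unfold flsStep
  rw [if_neg (fun hc => hv hc.2), if_neg (fun hc => absurd hc.1 (by omega)), if_pos ⟨h, hk⟩]

theorem flsStep_other (p : String) (frag : List String) (st : _ × _)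
    (hv : frag.length > 2 → frag.getD 2 "" ≠ p ∧ frag.getD 1 "" ≠ p)
    (h2 : frag.length = 2 → frag.getD 1 "" ≠ p) :
    flsStep p st frag = st := by
  unfold flsStep
  rw [if_neg (fun hc => (hv hc.1).1 hc.2), if_neg (fun hc => h2 hc.1 hc.2),
      if_neg (fun hc => (hv hc.1).2 hc.2)]

-- closed forms of the two loop bodies, by frag shape
def app3 (frag : List String) : Option String × Option String × Option String :=
  (some (frag.getD 0 ""), some (frag.getD 1 ""), some (frag.getD 3 ""))

def endStreak (lc : List (Option String × Option String × Option String) × List (Option String × Option String × Option String)) :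
    List (Option String × Option String × Option String) × List (Option String × Option String × Option String) :=
  (if lc.2.length > lc.1.length then lc.2 else lc.1, [])

def insV (s : PySem.Dict String (List (Option String × Option String × Option String) × List (Option String × Option String × Option String)))
    (frag : List String) :
    PySem.Dict String (List (Option String × Option String × Option String) × List (Option String × Option String × Option String)) :=
  s.insert (frag.getD 2 "") ((s.getD (frag.getD 2 "") ([], [])).1, (s.getD (frag.getD 2 "") ([], [])).2 ++ [app3 frag])

theorem stepB_gt2 (s : PySem.Dict String (List (Option String × Option String × Option String) × List (Option String × Option String × Option String)))
    (frag : List String) (h3 : frag.length > 2) :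
    cslAltStep s frag =
      if frag.getD 1 "" ≠ frag.getD 2 "" ∧ (insV s frag).contains (frag.getD 1 "")
      then (insV s frag).insert (frag.getD 1 "") (endStreak ((insV s frag).getD (frag.getD 1 "") ([], [])))
      else insV s frag := by
  unfold cslAltStep insV endStreak app3
  rw [if_pos h3]

theorem stepB_eq2 (s : PySem.Dict String (List (Option String × Option String × Option String) × List (Option String × Option String × Option String)))
    (frag : List String) (h2 : frag.length = 2) :
    cslAltStep s frag =
      s.insert (frag.getD 1 "") ((s.getD (frag.getD 1 "") ([], [])).1, (s.getD (frag.getD 1 "") ([], [])).2 ++ [(some (frag.getD 0 ""), none, none)]) := by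
  unfold cslAltStep
  rw [if_neg (by omega : ¬ frag.length > 2), if_pos h2]

theorem stepB_small (s : PySem.Dict String (List (Option String × Option String × Option String) × List (Option String × Option String × Option String)))
    (frag : List String) (h3 : ¬ frag.length > 2) (h2 : frag.length ≠ 2) :
    cslAltStep s frag = s := by
  unfold cslAltStep
  rw [if_neg h3, if_neg h2]

theorem stepA_gt2 (frags : List (List String)) (d : PySem.Dict String (List (Option String × Option String × Option String)))
    (frag : List String) (h3 : frag.length > 2) :
    cslStep frags d frag = if d.contains (frag.getD 2 "") then d
      else d.insert (frag.getD 2 "") (find_losing_streak (frag.getD 2 "") frags) := by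
  unfold cslStep
  by_cases hc : d.contains (frag.getD 2 "") = true
  · rw [if_neg (fun h => h.2 hc), if_neg (fun h => absurd h.1 (by omega : ¬ frag.length = 2)), if_pos hc]
  · rw [if_pos ⟨h3, hc⟩, if_neg hc]

theorem stepA_eq2 (frags : List (List String)) (d : PySem.Dict String (List (Option String × Option String × Option String)))
    (frag : List String) (h2 : frag.length = 2) :
    cslStep frags d frag = if d.contains (frag.getD 1 "") then d
      else d.insert (frag.getD 1 "") (find_losing_streak (frag.getD 1 "") frags) := by
  unfold cslStep
  rw [if_neg (fun h => absurd h.1 (by omega : ¬ frag.length > 2))]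
  by_cases hc : d.contains (frag.getD 1 "") = true
  · rw [if_neg (fun h => h.2 hc), if_pos hc]
  · rw [if_pos ⟨h2, hc⟩, if_neg hc]

theorem stepA_small (frags : List (List String)) (d : PySem.Dict String (List (Option String × Option String × Option String)))
    (frag : List String) (h3 : ¬ frag.length > 2) (h2 : frag.length ≠ 2) :
    cslStep frags d frag = d := by
  unfold cslStep
  rw [if_neg (fun h => h3 h.1), if_neg (fun h => h2 h.1)]

-- the fold of find_losing_streak's loop (both components)
def flsF (p : String) (l : List (List String)) :
    List (Option String × Option String × Option String) × List (Option String × Option String × Option String) :=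
  l.foldl (flsStep p) ([], [])

def AState (frags l : List (List String)) : PySem.Dict String (List (Option String × Option String × Option String)) :=
  l.foldl (cslStep frags) PySem.Dict.empty

def BState (l : List (List String)) :
    PySem.Dict String (List (Option String × Option String × Option String) × List (Option String × Option String × Option String)) :=
  l.foldl cslAltStep PySem.Dict.empty

-- the invariant tying A's dict and B's dict after the same processed prefix l
def LoopInv (frags l : List (List String)) : Prop :=
  (AState frags l).keys = (BState l).keys ∧
  (AState frags l).keys.Nodup ∧
  (∀ p ∈ (AState frags l).keys,
      (AState frags l).getD p [] = find_losing_streak p frags ∧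
      (BState l).getD p ([], []) = flsF p l) ∧
  (∀ p, p ∉ (AState frags l).keys → flsF p l = ([], []))

theorem inv_holds (frags l : List (List String)) : LoopInv frags l := by
  induction l using List.reverseRecOn with
  | nil =>
      refine ⟨rfl, ?_, ?_, ?_⟩ <;> simp [AState, BState, flsF, PySem.Dict.keys_empty]
  | append_singleton l frag ih =>
      obtain ⟨hkeys, hnd, hvals, hout⟩ := ih
      have hA : AState frags (l ++ [frag]) = cslStep frags (AState frags l) frag := by
        simp [AState, List.foldl_append]
      have hB : BState (l ++ [frag]) = cslAltStep (BState l) frag := by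
        simp [BState, List.foldl_append]
      have hF : ∀ p, flsF p (l ++ [frag]) = flsStep p (flsF p l) frag := by
        intro p; simp [flsF, List.foldl_append]
      unfold LoopInv
      rw [hA, hB]
      simp only [hF]
      by_cases h3 : frag.length > 2
      · -- frag has a weapon entry: victim = frag[2], killer = frag[1]
        rw [stepA_gt2 frags _ frag h3, stepB_gt2 _ frag h3]
        by_cases hcv : (AState frags l).contains (frag.getD 2 "") = true
        · -- victim already registered
          rw [if_pos hcv]
          have hvmem : frag.getD 2 "" ∈ (AState frags l).keys :=
            (PySem.Dict.contains_iff_mem_keys _ _).1 hcv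
          have hsv : (BState l).contains (frag.getD 2 "") = true :=
            (PySem.Dict.contains_iff_mem_keys _ _).2 (hkeys ▸ hvmem)
          have hkeys1 : (insV (BState l) frag).keys = (BState l).keys :=
            PySem.Dict.keys_insert_of_contains _ _ hsv
          have hkeysB : (if frag.getD 1 "" ≠ frag.getD 2 "" ∧ (insV (BState l) frag).contains (frag.getD 1 "")
              then (insV (BState l) frag).insert (frag.getD 1 "") (endStreak ((insV (BState l) frag).getD (frag.getD 1 "") ([], [])))
              else insV (BState l) frag).keys = (BState l).keys := by
            split_ifs with hc2
            · rw [PySem.Dict.keys_insert_of_contains _ _ hc2.2, hkeys1]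
            · exact hkeys1
          refine ⟨by rw [hkeysB]; exact hkeys, hnd, ?_, ?_⟩
          · intro p hp
            refine ⟨(hvals p hp).1, ?_⟩
            have hsp := (hvals p hp).2
            by_cases hpv : p = frag.getD 2 ""
            · subst hpv
              rw [flsStep_victim3 _ frag _ h3 rfl, ← hsp]
              split_ifs with hc2
              · rw [PySem.Dict.getD_insert, if_neg (fun he : frag.getD 2 "" = frag.getD 1 "" => hc2.1 he.symm)]
                unfold insV
                rw [PySem.Dict.getD_insert, if_pos rfl]
                rfl
              · unfold insV
                rw [PySem.Dict.getD_insert, if_pos rfl]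
                rfl
            · by_cases hpk : p = frag.getD 1 ""
              · have hkne : frag.getD 1 "" ≠ frag.getD 2 "" := fun he => hpv (hpk.trans he)
                have hcont : (insV (BState l) frag).contains (frag.getD 1 "") = true := by
                  unfold insV
                  rw [PySem.Dict.contains_insert]
                  have hck : (BState l).contains (frag.getD 1 "") = true :=
                    (PySem.Dict.contains_iff_mem_keys _ _).2 (hkeys ▸ (hpk ▸ hp))
                  rw [hck, Bool.or_true]
                rw [if_pos ⟨hkne, hcont⟩,
                    flsStep_killer p frag _ h3 (fun he : frag.getD 2 "" = p => hpv he.symm) hpk.symm,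
                    PySem.Dict.getD_insert, if_pos hpk]
                unfold insV
                rw [PySem.Dict.getD_insert, if_neg hkne, ← hpk, hsp]
                rfl
              · rw [flsStep_other p frag _
                      (fun _ => ⟨fun he : frag.getD 2 "" = p => hpv he.symm, fun he : frag.getD 1 "" = p => hpk he.symm⟩)
                      (fun he => absurd he (by omega)), ← hsp]
                split_ifs with hc2
                · rw [PySem.Dict.getD_insert, if_neg hpk]
                  unfold insV
                  rw [PySem.Dict.getD_insert, if_neg hpv]
                · unfold insV
                  rw [PySem.Dict.getD_insert, if_neg hpv]
          · intro p hp
            have h0 := hout p hp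
            by_cases hpk : frag.getD 1 "" = p
            · rw [h0, flsStep_killer p frag _ h3 (fun he : frag.getD 2 "" = p => hp (he ▸ hvmem)) hpk]
              simp
            · rw [h0, flsStep_other p frag _
                    (fun _ => ⟨fun he : frag.getD 2 "" = p => hp (he ▸ hvmem), hpk⟩)
                    (fun he => absurd he (by omega))]
        · -- victim is new: appended at the end of both dicts
          rw [if_neg hcv]
          have hcf : (AState frags l).contains (frag.getD 2 "") = false := by
            simpa using hcv
          have hvnot : frag.getD 2 "" ∉ (AState frags l).keys :=
            fun hm => hcv ((PySem.Dict.contains_iff_mem_keys _ _).2 hm)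
          have hsf : (BState l).contains (frag.getD 2 "") = false := by
            rcases h : (BState l).contains (frag.getD 2 "") with _ | _
            · rfl
            · exact absurd (hkeys ▸ (PySem.Dict.contains_iff_mem_keys _ _).1 h) hvnot
          have hkeysA : ((AState frags l).insert (frag.getD 2 "") (find_losing_streak (frag.getD 2 "") frags)).keys
              = (AState frags l).keys ++ [frag.getD 2 ""] :=
            PySem.Dict.keys_insert_of_not_contains _ _ hcf
          have hkeys1 : (insV (BState l) frag).keys = (BState l).keys ++ [frag.getD 2 ""] :=
            PySem.Dict.keys_insert_of_not_contains _ _ hsf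
          have hkeysB : (if frag.getD 1 "" ≠ frag.getD 2 "" ∧ (insV (BState l) frag).contains (frag.getD 1 "")
              then (insV (BState l) frag).insert (frag.getD 1 "") (endStreak ((insV (BState l) frag).getD (frag.getD 1 "") ([], [])))
              else insV (BState l) frag).keys = (BState l).keys ++ [frag.getD 2 ""] := by
            split_ifs with hc2
            · rw [PySem.Dict.keys_insert_of_contains _ _ hc2.2, hkeys1]
            · exact hkeys1
          have hsv0 : (BState l).getD (frag.getD 2 "") ([], []) = ([], []) :=
            PySem.Dict.getD_of_not_contains _ _ hsf
          refine ⟨by rw [hkeysA, hkeysB, hkeys], ?_, ?_, ?_⟩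
          · rw [hkeysA]
            refine List.nodup_append.2 ⟨hnd, List.nodup_singleton _, ?_⟩
            exact fun a ha b hb he => hvnot ((he.trans (List.eq_of_mem_singleton hb)) ▸ ha)
          · intro p hp
            rw [hkeysA, List.mem_append] at hp
            by_cases hpv : p = frag.getD 2 ""
            · subst hpv
              constructor
              · rw [PySem.Dict.getD_insert, if_pos rfl]
              · rw [flsStep_victim3 _ frag _ h3 rfl, hout _ hvnot]
                split_ifs with hc2
                · rw [PySem.Dict.getD_insert, if_neg (fun he : frag.getD 2 "" = frag.getD 1 "" => hc2.1 he.symm)]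
                  unfold insV
                  rw [PySem.Dict.getD_insert, if_pos rfl, hsv0]
                  rfl
                · unfold insV
                  rw [PySem.Dict.getD_insert, if_pos rfl, hsv0]
                  rfl
            · have hpmem : p ∈ (AState frags l).keys := by
                rcases hp with hp | hp
                · exact hp
                · exact absurd (by simpa using hp) hpv
              have hsp := (hvals p hpmem).2
              constructor
              · rw [PySem.Dict.getD_insert, if_neg hpv]
                exact (hvals p hpmem).1
              · by_cases hpk : p = frag.getD 1 ""
                · have hkne : frag.getD 1 "" ≠ frag.getD 2 "" := fun he => hpv (hpk.trans he)
                  have hcont : (insV (BState l) frag).contains (frag.getD 1 "") = true := by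
                    unfold insV
                    rw [PySem.Dict.contains_insert]
                    have hck : (BState l).contains (frag.getD 1 "") = true :=
                      (PySem.Dict.contains_iff_mem_keys _ _).2 (hkeys ▸ (hpk ▸ hpmem))
                    rw [hck, Bool.or_true]
                  rw [if_pos ⟨hkne, hcont⟩,
                      flsStep_killer p frag _ h3 (fun he : frag.getD 2 "" = p => hpv he.symm) hpk.symm,
                      PySem.Dict.getD_insert, if_pos hpk]
                  unfold insV
                  rw [PySem.Dict.getD_insert, if_neg hkne, ← hpk, hsp]
                  rfl
                · rw [flsStep_other p frag _
                        (fun _ => ⟨fun he : frag.getD 2 "" = p => hpv he.symm, fun he : frag.getD 1 "" = p => hpk he.symm⟩)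
                        (fun he => absurd he (by omega)), ← hsp]
                  split_ifs with hc2
                  · rw [PySem.Dict.getD_insert, if_neg hpk]
                    unfold insV
                    rw [PySem.Dict.getD_insert, if_neg hpv]
                  · unfold insV
                    rw [PySem.Dict.getD_insert, if_neg hpv]
          · intro p hp
            rw [hkeysA, List.mem_append] at hp
            rw [not_or] at hp
            have hpnot : p ∉ (AState frags l).keys := hp.1
            have hpv : frag.getD 2 "" ≠ p := fun he => hp.2 (by simp; exact he.symm)
            have h0 := hout p hpnot
            by_cases hpk : frag.getD 1 "" = p
            · rw [h0, flsStep_killer p frag _ h3 hpv hpk]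
              simp
            · rw [h0, flsStep_other p frag _ (fun _ => ⟨hpv, hpk⟩) (fun he => absurd he (by omega))]
      · by_cases h2 : frag.length = 2
        · -- suicide frag: victim = frag[1], no killer
          rw [stepA_eq2 frags _ frag h2, stepB_eq2 _ frag h2]
          by_cases hcv : (AState frags l).contains (frag.getD 1 "") = true
          · rw [if_pos hcv]
            have hvmem : frag.getD 1 "" ∈ (AState frags l).keys :=
              (PySem.Dict.contains_iff_mem_keys _ _).1 hcv
            have hsv : (BState l).contains (frag.getD 1 "") = true :=
              (PySem.Dict.contains_iff_mem_keys _ _).2 (hkeys ▸ hvmem)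
            refine ⟨by rw [PySem.Dict.keys_insert_of_contains _ _ hsv]; exact hkeys, hnd, ?_, ?_⟩
            · intro p hp
              refine ⟨(hvals p hp).1, ?_⟩
              have hsp := (hvals p hp).2
              by_cases hpv : p = frag.getD 1 ""
              · subst hpv
                rw [flsStep_victim2 _ frag _ h2 rfl, ← hsp, PySem.Dict.getD_insert, if_pos rfl]
              · rw [flsStep_other p frag _ (fun hg => absurd hg h3)
                      (fun _ => fun he : frag.getD 1 "" = p => hpv he.symm),
                    ← hsp, PySem.Dict.getD_insert, if_neg hpv]
            · intro p hp
              rw [flsStep_other p frag _ (fun hg => absurd hg h3)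
                    (fun _ => fun he : frag.getD 1 "" = p => hp (he ▸ hvmem)),
                  hout p hp]
          · rw [if_neg hcv]
            have hcf : (AState frags l).contains (frag.getD 1 "") = false := by simpa using hcv
            have hvnot : frag.getD 1 "" ∉ (AState frags l).keys :=
              fun hm => hcv ((PySem.Dict.contains_iff_mem_keys _ _).2 hm)
            have hsf : (BState l).contains (frag.getD 1 "") = false := by
              rcases h : (BState l).contains (frag.getD 1 "") with _ | _
              · rfl
              · exact absurd (hkeys ▸ (PySem.Dict.contains_iff_mem_keys _ _).1 h) hvnot
            have hsv0 : (BState l).getD (frag.getD 1 "") ([], []) = ([], []) :=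
              PySem.Dict.getD_of_not_contains _ _ hsf
            refine ⟨?_, ?_, ?_, ?_⟩
            · rw [PySem.Dict.keys_insert_of_not_contains _ _ hcf,
                  PySem.Dict.keys_insert_of_not_contains _ _ hsf, hkeys]
            · rw [PySem.Dict.keys_insert_of_not_contains _ _ hcf]
              refine List.nodup_append.2 ⟨hnd, List.nodup_singleton _, ?_⟩
              exact fun a ha b hb he => hvnot ((he.trans (List.eq_of_mem_singleton hb)) ▸ ha)
            · intro p hp
              rw [PySem.Dict.keys_insert_of_not_contains _ _ hcf, List.mem_append] at hp
              by_cases hpv : p = frag.getD 1 ""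
              · subst hpv
                constructor
                · rw [PySem.Dict.getD_insert, if_pos rfl]
                · rw [flsStep_victim2 _ frag _ h2 rfl, hout _ hvnot,
                      PySem.Dict.getD_insert, if_pos rfl, hsv0]
              · have hpmem : p ∈ (AState frags l).keys := by
                  rcases hp with hp | hp
                  · exact hp
                  · exact absurd (by simpa using hp) hpv
                refine ⟨by rw [PySem.Dict.getD_insert, if_neg hpv]; exact (hvals p hpmem).1, ?_⟩
                rw [flsStep_other p frag _ (fun hg => absurd hg h3)
                      (fun _ => fun he : frag.getD 1 "" = p => hpv he.symm),
                    ← (hvals p hpmem).2, PySem.Dict.getD_insert, if_neg hpv]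
            · intro p hp
              rw [PySem.Dict.keys_insert_of_not_contains _ _ hcf, List.mem_append] at hp
              rw [not_or] at hp
              have hpv : frag.getD 1 "" ≠ p := fun he => hp.2 (by simp; exact he.symm)
              rw [flsStep_other p frag _ (fun hg => absurd hg h3) (fun _ => hpv), hout p hp.1]
        · -- frag of length 0 or 1: both loops skip it
          rw [stepA_small frags _ frag h3 h2, stepB_small _ frag h3 h2]
          refine ⟨hkeys, hnd, ?_, ?_⟩
          · intro p hp
            rw [flsStep_other p frag _ (fun hg => absurd hg h3) (fun hg => absurd hg h2)]
            exact hvals p hp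
          · intro p hp
            rw [flsStep_other p frag _ (fun hg => absurd hg h3) (fun hg => absurd hg h2)]
            exact hout p hp

theorem calculate_serial_losers_spec : Claim_equal_calculate_serial_losers := by
  intro frags _ _
  unfold Spec_calculate_serial_losers calculate_serial_losers calculate_serial_losers_alt
  obtain ⟨hkeys, hnd, hvals, -⟩ := inv_holds frags frags
  show (AState frags frags).items = ((BState frags).items).map (fun p => (p.1, p.2.1))
  rw [PySem.Dict.items_eq_map_keys _ hnd ([] : List (Option String × Option String × Option String)),
      PySem.Dict.items_eq_map_keys (BState frags) (hkeys ▸ hnd) (([], []) : _ × _),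
      List.map_map, ← hkeys]
  apply List.map_congr_left
  intro k hk
  have h := hvals k hk
  simp only [Function.comp, h.1, h.2]
  rfl
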